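-- pv_equiv track=rewrite | github.com/xcellentbird/algorithm-training | Programmers/게임아이템.py | solution
-- ===== SOURCE A (Python) =====
-- from collections import Counter
--
-- def solution(healths, items):
--     # 체력이 낮은 케릭부터 얼른 무기를 챙겨줘야한다.
--     # 체력 1000짜리 케릭이 낮추는 체력 1짜리 아이템을 사용하기엔 비효율적이기 때문.
--     healths.sort()
--     mx = healths[-1]
--
--     # Linkedlist를 이용함으로써 del시켰을 때 시간복잡도 절약
--     healths = Counter(healths)
--
--     # item에 index를 달고, 어차피 최대 체력(health)보다 높은 건 사용 못하니 미리 거른다!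
--     items = [[item[0], item[1], i+1] for i, item in enumerate(items) if item[1] < mx]
--
--     # 목적은 공격치 최대화기 때문에, 공격치 제일 큰 게 앞으로 오게끔 하여 큰 우선순위로 둔다.
--     items.sort(reverse=True)
--
--     item_picked = []
--
--     # 공격치 높은 것을 최우선으로 비교한다.
--     for up, down, idx in items:
--         for health in healths:
--
--             # 아이템을 사용한 케릭터는 체력이 100이상 남아야하기 때문에
--             if health - down >= 100:
--                 item_picked.append(idx) # item 찜!
--
--                 # health가 2개인 것도 있어서 넣은 구문.
--                 healths[health] -= 1
--
--                 # healths가 없으면 del! - Linkiedlist를 쓴 이유가 여기에 있다. 시간복잡도 절약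
--                 if not healths[health]:
--                     del healths[health]
--
--                 break
--
--     # 아이템 번호 오름차순 반환
--     return sorted(item_picked)
-- ===== SOURCE B (Python) =====
-- import bisect
--
-- def solution(healths, items):
--     # sorted health multiset + binary search for the smallest remaining health >= down+100
--     hs = sorted(healths)
--     order = sorted(((it[0], it[1], i + 1) for i, it in enumerate(items)), reverse=True)
--     picked = []
--     for up, down, idx in order:
--         j = bisect.bisect_left(hs, down + 100)
--         if j < len(hs):
--             picked.append(idx)
--             del hs[j]
--     picked.sort()
--     return picked
-- ===== Notes on version B (the rewrite author's own statement) =====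
-- stated objective: faster
-- what changed: A scans the Counter of remaining healths linearly for every item; B keeps the remaining healths as one sorted list and finds the smallest sufficient health with bisect (binary search), deleting it in place, and skips A's pre-filter of items whose 'down' reaches the maximum health since those can never be assigned anyway.
import Mathlib
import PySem

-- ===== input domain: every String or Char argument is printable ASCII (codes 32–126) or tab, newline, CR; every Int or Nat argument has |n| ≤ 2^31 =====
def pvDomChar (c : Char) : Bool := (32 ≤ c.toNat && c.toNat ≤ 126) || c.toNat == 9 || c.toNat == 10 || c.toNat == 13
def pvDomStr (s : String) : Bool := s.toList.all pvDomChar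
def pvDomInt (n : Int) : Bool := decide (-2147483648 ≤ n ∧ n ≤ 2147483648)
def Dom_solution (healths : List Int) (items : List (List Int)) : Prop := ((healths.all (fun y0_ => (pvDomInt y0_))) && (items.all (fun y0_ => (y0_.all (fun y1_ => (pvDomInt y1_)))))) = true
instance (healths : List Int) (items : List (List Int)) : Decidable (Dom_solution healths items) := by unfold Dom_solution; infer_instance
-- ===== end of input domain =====

-- B replaces A's per-item linear scan over the Counter of remaining healths by a bisect
-- (binary search) on one sorted list of remaining healths (objective: faster, measured).
-- A sorts `healths` in place (list.sort()); the equivalence proved here is about the return value only.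

-- ===== PORT A =====
-- helpers shared by both ports (both Pythons build the same (up, down, index+1) triples
-- and sort them with Python's reverse tuple order; pvKey3 is that lexicographic order)
def pvMk3 (p : Int × List Int) : Int × Int × Int :=
  (PySem.List.pyGetD p.2 0 0, PySem.List.pyGetD p.2 1 0, p.1 + 1)

def pvKey3 (t : Int × Int × Int) : Lex (Int × Lex (Int × Int)) :=
  toLex (t.1, toLex (t.2.1, t.2.2))

-- one iteration of A's outer loop: scan the Counter keys (in insertion = ascending order)
-- for the first health with health - down >= 100, decrement it, delete the key at zero
def pvStepA (st : PySem.Dict Int Int × List Int) (t : Int × Int × Int) :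
    PySem.Dict Int Int × List Int :=
  match st.1.keys.find? (fun h => decide (100 ≤ h - t.2.1)) with
  | none => st
  | some h =>
    let v := st.1.getD h 0 - 1
    let d1 := st.1.insert h v
    (if v = 0 then d1.erase h else d1, st.2 ++ [t.2.2])

def solution (healths : List Int) (items : List (List Int)) : List Int :=
  let hs := PySem.List.sorted healths (fun x => x) false
  let mx := PySem.List.pyGetD hs (-1) 0         -- healths[-1]; Pre_ gives healths ≠ []
  let cnt := PySem.Dict.counter hs              -- Counter(healths)
  let its := PySem.List.sorted
      (((PySem.List.enumerate items 0).filter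
          (fun p => decide (PySem.List.pyGetD p.2 1 0 < mx))).map pvMk3) pvKey3 true
  let res := its.foldl pvStepA (cnt, [])
  PySem.List.sorted res.2 (fun x => x) false

-- ===== PORT B =====
-- one iteration of B's loop: bisect for the smallest remaining health >= down + 100
def pvStepB (st : List Int × List Int) (t : Int × Int × Int) : List Int × List Int :=
  let j := PySem.List.bisectLeft st.1 (t.2.1 + 100)
  if j < st.1.length then (st.1.eraseIdx j, st.2 ++ [t.2.2]) else st

def solution_alt (healths : List Int) (items : List (List Int)) : List Int :=
  let hs := PySem.List.sorted healths (fun x => x) false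
  let order := PySem.List.sorted ((PySem.List.enumerate items 0).map pvMk3) pvKey3 true
  let res := order.foldl pvStepB (hs, [])
  PySem.List.sorted res.2 (fun x => x) false

-- ===== PRECONDITION & SPEC =====
-- Pre_ excludes exactly the inputs where the Python raises IndexError: empty `healths`
-- (healths[-1]) and items with fewer than two entries (item[0] / item[1]).
def Pre_solution (healths : List Int) (items : List (List Int)) : Prop :=
  healths ≠ [] ∧ ∀ it ∈ items, 2 ≤ it.length
instance (healths : List Int) (items : List (List Int)) : Decidable (Pre_solution healths items) := by
  unfold Pre_solution; infer_instance

def pvWitness_solution : List Int × List (List Int) := ([100, 200], [[5, 50], [3, 0]])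

def Spec_solution (healths : List Int) (items : List (List Int)) (out : List Int) : Prop :=
  out = solution_alt healths items
instance (healths : List Int) (items : List (List Int)) (out : List Int) : Decidable (Spec_solution healths items out) := by unfold Spec_solution; infer_instance

-- ===== CLAIM (what is proved, stated in full; the proofs are below) =====
def Claim_equal_solution : Prop := ∀ (healths : List Int) (items : List (List Int)), Dom_solution healths items → Pre_solution healths items → Spec_solution healths items (solution healths items)

-- ===== LEMMAS AND PROOFS =====

-- the remaining-healths multiset, as A's run-length entries expanded back to a list
def pvExpand (es : List (Int × Int)) : List Int :=
  es.flatMap (fun p => List.replicate p.2.toNat p.1)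

-- mathematical description of one assignment step on the run-length entries
def pvPick (t : Int) : List (Int × Int) → List (Int × Int) × Bool
  | [] => ([], false)
  | (k, c) :: rest =>
    if t ≤ k then (if c = 1 then rest else (k, c - 1) :: rest, true)
    else ((k, c) :: (pvPick t rest).1, (pvPick t rest).2)


lemma pvBisect_unique (xs : List Int) (x : Int) (hs : xs.Pairwise (· ≤ ·)) (b : Nat)
    (hb : b ≤ xs.length)
    (h1 : ∀ (j : Nat) (hj : j < xs.length), j < b → xs[j] < x)
    (h2 : ∀ (j : Nat) (hj : j < xs.length), b ≤ j → x ≤ xs[j]) :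
    PySem.List.bisectLeft xs x = b := by
  obtain ⟨hle, hlt, hge⟩ := PySem.List.bisectLeft_spec xs x hs
  set n := PySem.List.bisectLeft xs x with hn
  rcases Nat.lt_trichotomy n b with h | h | h
  · have hj : n < xs.length := lt_of_lt_of_le h hb
    exact absurd (h1 n hj h) (not_lt.mpr (hge n hj le_rfl))
  · exact h
  · have hj : b < xs.length := lt_of_lt_of_le h hle
    exact absurd (hlt b hj h) (not_lt.mpr (h2 b hj le_rfl))

lemma pvBisect_zero (xs : List Int) (x : Int) (hs : xs.Pairwise (· ≤ ·))
    (h : ∀ a ∈ xs, x ≤ a) : PySem.List.bisectLeft xs x = 0 :=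
  pvBisect_unique xs x hs 0 (Nat.zero_le _) (fun j hj hlt => absurd hlt (Nat.not_lt_zero j))
    (fun j hj _ => h xs[j] (xs.getElem_mem hj))

lemma pvBisect_len (xs : List Int) (x : Int) (hs : xs.Pairwise (· ≤ ·))
    (h : ∀ a ∈ xs, a < x) : PySem.List.bisectLeft xs x = xs.length :=
  pvBisect_unique xs x hs xs.length le_rfl (fun j hj _ => h xs[j] (xs.getElem_mem hj))
    (fun j hj hle => absurd hj (not_lt.mpr hle))

lemma pvBisect_append (xs ys : List Int) (x : Int) (hs : (xs ++ ys).Pairwise (· ≤ ·))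
    (h : ∀ a ∈ xs, a < x) :
    PySem.List.bisectLeft (xs ++ ys) x = xs.length + PySem.List.bisectLeft ys x := by
  have hys : ys.Pairwise (· ≤ ·) := (List.pairwise_append.mp hs).2.1
  obtain ⟨hle, hlt, hge⟩ := PySem.List.bisectLeft_spec ys x hys
  set n := PySem.List.bisectLeft ys x with hn
  refine pvBisect_unique _ x hs (xs.length + n) (by simp; omega) ?_ ?_
  · intro j hj hjb
    by_cases hjx : j < xs.length
    · rw [List.getElem_append_left hjx]
      exact h _ (xs.getElem_mem hjx)
    · rw [Nat.not_lt] at hjx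
      rw [List.getElem_append_right hjx]
      exact hlt _ (by simp at hj ⊢; omega) (by omega)
  · intro j hj hjb
    have hjx : xs.length ≤ j := le_trans (Nat.le_add_right _ _) hjb
    rw [List.getElem_append_right hjx]
    exact hge _ (by simp at hj ⊢; omega) (by omega)

lemma pvMem_expand {a : Int} {es : List (Int × Int)} (h : a ∈ pvExpand es) :
    ∃ p ∈ es, a = p.1 := by
  unfold pvExpand at h
  obtain ⟨p, hp, ha⟩ := List.mem_flatMap.mp h
  exact ⟨p, hp, List.eq_of_mem_replicate ha⟩

lemma pvExpand_sorted (es : List (Int × Int)) (h : es.Pairwise (fun p q => p.1 < q.1)) :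
    (pvExpand es).Pairwise (· ≤ ·) := by
  induction es with
  | nil => simp [pvExpand]
  | cons p rest ih =>
    have : pvExpand (p :: rest) = List.replicate p.2.toNat p.1 ++ pvExpand rest := rfl
    rw [this, List.pairwise_append]
    refine ⟨List.pairwise_replicate.mpr (by simp), ih h.of_cons, ?_⟩
    intro a ha b hb
    obtain ⟨q, hq, hb'⟩ := pvMem_expand hb
    have := List.eq_of_mem_replicate ha
    subst this; subst hb'
    exact le_of_lt ((List.pairwise_cons.mp h).1 q hq)

lemma pvPick_noop (t : Int) (es : List (Int × Int)) (h : ∀ p ∈ es, p.1 < t) :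
    pvPick t es = (es, false) := by
  induction es with
  | nil => rfl
  | cons p rest ih =>
    obtain ⟨k, c⟩ := p
    have hk : ¬ t ≤ k := not_le.mpr (h (k, c) (by simp))
    simp only [pvPick, if_neg hk, ih (fun q hq => h q (List.mem_cons_of_mem _ hq))]

lemma pvPick_inv (t : Int) (es : List (Int × Int))
    (h1 : es.Pairwise (fun p q => p.1 < q.1)) (h2 : ∀ p ∈ es, 0 < p.2) :
    (pvPick t es).1.Pairwise (fun p q => p.1 < q.1) ∧
    (∀ p ∈ (pvPick t es).1, 0 < p.2) ∧
    (∀ p ∈ (pvPick t es).1, ∃ q ∈ es, p.1 = q.1) := by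
  induction es with
  | nil => simp [pvPick]
  | cons p rest ih =>
    obtain ⟨k, c⟩ := p
    obtain ⟨hhead, htail⟩ := List.pairwise_cons.mp h1
    have h2' : ∀ q ∈ rest, 0 < q.2 := fun q hq => h2 q (List.mem_cons_of_mem _ hq)
    by_cases hk : t ≤ k
    · simp only [pvPick, if_pos hk]
      by_cases hc : c = 1
      · simp only [if_pos hc]
        exact ⟨htail, h2', fun q hq => ⟨q, List.mem_cons_of_mem _ hq, rfl⟩⟩
      · simp only [if_neg hc]
        have hcpos : 0 < c := h2 (k, c) (by simp)
        refine ⟨List.pairwise_cons.mpr ⟨hhead, htail⟩, ?_, ?_⟩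
        · intro q hq
          rcases List.mem_cons.mp hq with h | h
          · subst h; simp; omega
          · exact h2' q h
        · intro q hq
          rcases List.mem_cons.mp hq with h | h
          · subst h; exact ⟨(k, c), by simp⟩
          · exact ⟨q, List.mem_cons_of_mem _ h, rfl⟩
    · simp only [pvPick, if_neg hk]
      obtain ⟨ih1, ih2, ih3⟩ := ih htail h2'
      refine ⟨List.pairwise_cons.mpr ⟨?_, ih1⟩, ?_, ?_⟩
      · intro q hq
        obtain ⟨r, hr, hqr⟩ := ih3 q hq
        rw [hqr]; exact hhead r hr
      · intro q hq
        rcases List.mem_cons.mp hq with h | h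
        · subst h; exact h2 (k, c) (by simp)
        · exact ih2 q h
      · intro q hq
        rcases List.mem_cons.mp hq with h | h
        · subst h; exact ⟨(k, c), by simp⟩
        · obtain ⟨r, hr, hqr⟩ := ih3 q h
          exact ⟨r, List.mem_cons_of_mem _ hr, hqr⟩

lemma pvStepA_eq (es : List (Int × Int))
    (h1 : es.Pairwise (fun p q => p.1 < q.1)) (h2 : ∀ p ∈ es, 0 < p.2)
    (up down idx : Int) (picked : List Int) :
    pvStepA (PySem.Dict.mk es, picked) (up, down, idx) =
      (PySem.Dict.mk (pvPick (down + 100) es).1,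
       if (pvPick (down + 100) es).2 then picked ++ [idx] else picked) := by
  induction es generalizing picked with
  | nil => simp [pvStepA, pvPick, PySem.Dict.keys]
  | cons p rest ih =>
    obtain ⟨k, c⟩ := p
    obtain ⟨hhead, htail⟩ := List.pairwise_cons.mp h1
    have h2' : ∀ q ∈ rest, 0 < q.2 := fun q hq => h2 q (List.mem_cons_of_mem _ hq)
    have hkeys : (PySem.Dict.mk ((k, c) :: rest)).keys = k :: rest.map Prod.fst := by
      simp [PySem.Dict.keys]
    by_cases hk : 100 ≤ k - down
    · -- head key is picked
      have hk' : down + 100 ≤ k := by omega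
      have hfind : (PySem.Dict.mk ((k, c) :: rest)).keys.find?
          (fun h => decide (100 ≤ h - down)) = some k := by
        rw [hkeys]; simp [List.find?, hk]
      have hget : (PySem.Dict.mk ((k, c) :: rest)).getD k 0 = c := by
        simp [PySem.Dict.getD, PySem.Dict.get?, List.find?]
      have hcontains : (PySem.Dict.mk ((k, c) :: rest)).contains k = true := by
        simp [PySem.Dict.contains]
      have hrestne : ∀ q ∈ rest, ¬ (q.1 == k) = true := by
        intro q hq
        simp only [beq_iff_eq]
        exact ne_of_gt (hhead q hq)
      have hins : (PySem.Dict.mk ((k, c) :: rest)).insert k (c - 1)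
          = PySem.Dict.mk ((k, c - 1) :: rest) := by
        simp only [PySem.Dict.insert, hcontains, if_pos]
        congr 1
        simp only [List.map_cons, beq_self_eq_true, if_pos]
        rw [List.map_congr_left (fun q hq => if_neg (hrestne q hq))]
        simp
      have hera : ∀ v : Int, (PySem.Dict.mk ((k, v) :: rest)).erase k = PySem.Dict.mk rest := by
        intro v
        simp only [PySem.Dict.erase]
        congr 1
        rw [List.filter_cons]
        simp only [beq_self_eq_true, Bool.not_true, if_neg Bool.false_ne_true]
        rw [List.filter_eq_self.mpr (fun q hq => by simp [hrestne q hq])]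
      simp only [pvStepA, hfind, hget, hins, pvPick, if_pos hk']
      by_cases hc : c = 1
      · simp [hc]; exact hera 0
      · have : ¬ (c - 1 = 0) := by
          intro h; exact hc (by omega)
        simp [this, hc]
    · -- head key is skipped
      have hk' : ¬ down + 100 ≤ k := by omega
      have hihe := ih htail h2' picked
      simp only [pvStepA, hkeys] at hihe ⊢
      rw [List.find?_cons_of_neg (by simp [hk])]
      have hkeys' : (PySem.Dict.mk rest).keys = rest.map Prod.fst := by
        simp [PySem.Dict.keys]
      rw [hkeys'] at hihe
      cases hfind : (rest.map Prod.fst).find? (fun h => decide (100 ≤ h - down)) with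
      | none =>
        -- no key anywhere
        have hnone : ∀ q ∈ rest, q.1 < down + 100 := by
          intro q hq
          have := List.find?_eq_none.mp hfind q.1 (List.mem_map_of_mem hq)
          simp at this; omega
        rw [pvPick_noop (down + 100) ((k, c) :: rest)
          (by intro q hq; rcases List.mem_cons.mp hq with h | h
              · subst h; simpa using hk'
              · exact hnone q h)]
        simp
      | some h =>
        -- the found key lies in rest; relate cons-dict ops to rest-dict ops
        have hhmem : h ∈ rest.map Prod.fst := List.mem_of_find?_eq_some hfind
        have hkh : k ≠ h := by
          obtain ⟨q, hq, hqe⟩ := List.mem_map.mp hhmem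
          subst hqe
          exact ne_of_lt (hhead q hq)
        have hget : (PySem.Dict.mk ((k, c) :: rest)).getD h 0
            = (PySem.Dict.mk rest).getD h 0 := by
          simp [PySem.Dict.getD, PySem.Dict.get?, List.find?,
            show ¬(k == h) = true by simp [hkh]]
        have hconr : (PySem.Dict.mk rest).contains h = true := by
          simp only [PySem.Dict.contains]
          obtain ⟨q, hq, hqe⟩ := List.mem_map.mp hhmem
          exact List.any_of_mem hq (by simp [hqe])
        have hconc : (PySem.Dict.mk ((k, c) :: rest)).contains h = true := by
          simp only [PySem.Dict.contains] at hconr ⊢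
          simp [List.any_cons, hconr]
        have hins : ∀ v, (PySem.Dict.mk ((k, c) :: rest)).insert h v
            = PySem.Dict.mk ((k, c) :: ((PySem.Dict.mk rest).insert h v).items) := by
          intro v
          simp only [PySem.Dict.insert, hconc, hconr, if_pos, List.map_cons]
          rw [if_neg (by simp [hkh])]
        have hera : ∀ (d : PySem.Dict Int Int),
            (PySem.Dict.mk ((k, c) :: d.items)).erase h
            = PySem.Dict.mk ((k, c) :: (d.erase h).items) := by
          intro d
          simp [PySem.Dict.erase, show ¬(k == h) = true by simp [hkh]]
        rw [hfind] at hihe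
        simp only [pvPick, if_neg hk']
        simp only [hget, hins, hera]
        by_cases hv : (PySem.Dict.mk rest).getD h 0 - 1 = 0
        · simp only [if_pos hv] at hihe ⊢
          have e1 := congrArg Prod.fst hihe
          have e2 := congrArg Prod.snd hihe
          simp at e1 e2
          rw [show ((PySem.Dict.mk rest).insert h ((PySem.Dict.mk rest).getD h 0 - 1)).erase h
              = PySem.Dict.mk (pvPick (down + 100) rest).1 from e1]
          simp [e2]
        · simp only [if_neg hv] at hihe ⊢
          have e1 := congrArg Prod.fst hihe
          have e2 := congrArg Prod.snd hihe
          simp at e1 e2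
          rw [show (PySem.Dict.mk rest).insert h ((PySem.Dict.mk rest).getD h 0 - 1)
              = PySem.Dict.mk (pvPick (down + 100) rest).1 from e1]
          simp [e2]

lemma pvStepB_eq (es : List (Int × Int))
    (h1 : es.Pairwise (fun p q => p.1 < q.1)) (h2 : ∀ p ∈ es, 0 < p.2)
    (up down idx : Int) (picked : List Int) :
    pvStepB (pvExpand es, picked) (up, down, idx) =
      (pvExpand (pvPick (down + 100) es).1,
       if (pvPick (down + 100) es).2 then picked ++ [idx] else picked) := by
  induction es generalizing picked with
  | nil =>
    simp [pvStepB, pvPick, pvExpand, show PySem.List.bisectLeft ([] : List Int) (down + 100) = 0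
      from pvBisect_zero [] _ (by simp) (by simp)]
  | cons p rest ih =>
    obtain ⟨k, c⟩ := p
    obtain ⟨hhead, htail⟩ := List.pairwise_cons.mp h1
    have h2' : ∀ q ∈ rest, 0 < q.2 := fun q hq => h2 q (List.mem_cons_of_mem _ hq)
    have hcpos : 0 < c := h2 (k, c) (by simp)
    have hsorted : (pvExpand ((k, c) :: rest)).Pairwise (· ≤ ·) := pvExpand_sorted _ h1
    have hexp : pvExpand ((k, c) :: rest) = List.replicate c.toNat k ++ pvExpand rest := rfl
    have hctn : c.toNat = (c - 1).toNat + 1 := by omega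
    by_cases hk : down + 100 ≤ k
    · -- every element is ≥ k ≥ down+100: bisect = 0, erase the head copy of k
      have hb0 : PySem.List.bisectLeft (pvExpand ((k, c) :: rest)) (down + 100) = 0 := by
        refine pvBisect_zero _ _ hsorted ?_
        intro a ha
        obtain ⟨q, hq, haq⟩ := pvMem_expand ha
        subst haq
        rcases List.mem_cons.mp hq with h | h
        · subst h; exact hk
        · exact le_trans hk (le_of_lt (hhead q h))
      have hlen : 0 < (pvExpand ((k, c) :: rest)).length := by
        rw [hexp]; simp; omega
      have htailrepl : List.replicate c.toNat k = k :: List.replicate (c - 1).toNat k := by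
        rw [hctn]; rfl
      simp only [pvStepB, hb0, if_pos hlen, pvPick, if_pos hk]
      by_cases hc : c = 1
      · subst hc
        simp [hexp]
      · simp only [if_neg hc]
        have : pvExpand ((k, c - 1) :: rest) = List.replicate (c-1).toNat k ++ pvExpand rest := rfl
        simp [hexp, htailrepl, this]
    · -- all copies of k are < down+100: bisect lands past them
      have hrepl_lt : ∀ a ∈ List.replicate c.toNat k, a < down + 100 := by
        intro a ha
        rw [List.eq_of_mem_replicate ha]; omega
      have hb : PySem.List.bisectLeft (pvExpand ((k, c) :: rest)) (down + 100)
          = c.toNat + PySem.List.bisectLeft (pvExpand rest) (down + 100) := by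
        rw [hexp]
        rw [pvBisect_append _ _ _ (hexp ▸ hsorted) hrepl_lt]
        simp
      have hihe := ih htail h2' picked
      simp only [pvStepB] at hihe ⊢
      rw [hb, hexp]
      have hlenspec := (PySem.List.bisectLeft_spec (pvExpand rest) (down + 100)
        (pvExpand_sorted rest htail)).1
      set n := PySem.List.bisectLeft (pvExpand rest) (down + 100) with hn
      simp only [pvPick, if_neg hk]
      by_cases hcase : n < (pvExpand rest).length
      · have hcase' : c.toNat + n < (List.replicate c.toNat k ++ pvExpand rest).length := by
          simp; omega
        simp only [if_pos hcase'] at ⊢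
        simp only [if_pos hcase] at hihe
        have e1 := congrArg Prod.fst hihe
        have e2 := congrArg Prod.snd hihe
        simp only at e1 e2
        rw [List.eraseIdx_append_of_length_le (by simp) (pvExpand rest)]
        have : pvExpand ((k, c) :: (pvPick (down + 100) rest).1)
            = List.replicate c.toNat k ++ pvExpand (pvPick (down + 100) rest).1 := rfl
        rw [this, ← e1, ← e2]
        simp
      · have hcase' : ¬ (c.toNat + n < (List.replicate c.toNat k ++ pvExpand rest).length) := by
          simp; omega
        simp only [if_neg hcase'] at ⊢
        simp only [if_neg hcase] at hihe
        have e1 := congrArg Prod.fst hihe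
        have e2 := congrArg Prod.snd hihe
        simp only at e1 e2
        have : pvExpand ((k, c) :: (pvPick (down + 100) rest).1)
            = List.replicate c.toNat k ++ pvExpand (pvPick (down + 100) rest).1 := rfl
        rw [this, ← e1, ← e2]

lemma pvLoop_sim (mx : Int) (L : List (Int × Int × Int)) :
    ∀ (es : List (Int × Int)) (picked : List Int),
    es.Pairwise (fun p q => p.1 < q.1) → (∀ p ∈ es, 0 < p.2) → (∀ p ∈ es, p.1 ≤ mx) →
    ((L.filter (fun t => decide (t.2.1 < mx))).foldl pvStepA (PySem.Dict.mk es, picked)).2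
      = (L.foldl pvStepB (pvExpand es, picked)).2 := by
  induction L with
  | nil => intro es picked _ _ _; simp
  | cons t L ih =>
    intro es picked hp hpos hbd
    obtain ⟨up, down, idx⟩ := t
    obtain ⟨hp', hpos', hsub⟩ := pvPick_inv (down + 100) es hp hpos
    have hbd' : ∀ p ∈ (pvPick (down + 100) es).1, p.1 ≤ mx := by
      intro p hpmem
      obtain ⟨q, hq, hpq⟩ := hsub p hpmem
      rw [hpq]; exact hbd q hq
    by_cases hmx : down < mx
    · rw [List.filter_cons_of_pos (by simp [hmx])]
      simp only [List.foldl_cons]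
      rw [pvStepA_eq es hp hpos up down idx picked, pvStepB_eq es hp hpos up down idx picked]
      exact ih _ _ hp' hpos' hbd'
    · rw [List.filter_cons_of_neg (by simp [hmx])]
      simp only [List.foldl_cons]
      have hnoop : pvStepB (pvExpand es, picked) (up, down, idx) = (pvExpand es, picked) := by
        have hall : ∀ a ∈ pvExpand es, a < down + 100 := by
          intro a ha
          obtain ⟨q, hq, haq⟩ := pvMem_expand ha
          have := hbd q hq
          omega
        simp [pvStepB, pvBisect_len _ _ (pvExpand_sorted es hp) hall]
      rw [hnoop]
      exact ih _ _ hp hpos hbd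

lemma pvDedup_strict (hs : List Int) (h : hs.Pairwise (· ≤ ·)) :
    (PySem.Set.ofList hs).Pairwise (· < ·) := by
  induction hs with
  | nil => simp
  | cons x xs ih =>
    rw [PySem.Set.ofList_cons]
    refine List.pairwise_cons.mpr ⟨?_, ?_⟩
    · intro y hy
      obtain ⟨hy1, hy2⟩ := (PySem.Set.mem_discard _ _ _).mp hy
      have hyx : y ∈ xs := (PySem.Set.mem_ofList _ _).mp hy1
      exact lt_of_le_of_ne ((List.pairwise_cons.mp h).1 y hyx) (Ne.symm hy2)
    · exact (ih h.of_cons).sublist List.filter_sublist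


lemma pvKey3_inj {a b : Int × Int × Int} (h : pvKey3 a = pvKey3 b) : a = b := by
  obtain ⟨a1, a2, a3⟩ := a
  obtain ⟨b1, b2, b3⟩ := b
  unfold pvKey3 at h
  have := congrArg ofLex h
  simp at this
  simp [this.1, this.2.1, this.2.2]

lemma pvDiscard_not_mem (xs : List Int) (x : Int) (h : x ∉ xs) :
    PySem.Set.discard (PySem.Set.ofList xs) x = PySem.Set.ofList xs := by
  refine List.filter_eq_self.mpr ?_
  intro y hy
  have hyx : y ∈ xs := (PySem.Set.mem_ofList _ _).mp hy
  have hne : y ≠ x := fun he => h (he ▸ hyx)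
  simp [hne]

lemma pvDiscard_cons_self (s : List Int) (x : Int) :
    PySem.Set.discard (x :: s) x = PySem.Set.discard s x := by
  simp [PySem.Set.discard]

lemma pvDiscard_idem (s : List Int) (x : Int) :
    PySem.Set.discard (PySem.Set.discard s x) x = PySem.Set.discard s x := by
  simp [PySem.Set.discard, List.filter_filter]

lemma pvExpand_counter (hs : List Int) (h : hs.Pairwise (· ≤ ·)) :
    pvExpand ((PySem.Set.ofList hs).map (fun k => (k, (List.count k hs : Int)))) = hs := by
  induction hs with
  | nil => rfl
  | cons x xs ih =>
    have hx_le : ∀ y ∈ xs, x ≤ y := (List.pairwise_cons.mp h).1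
    have htail : xs.Pairwise (· ≤ ·) := h.of_cons
    rw [PySem.Set.ofList_cons, List.map_cons]
    have hexp : ∀ (p : Int × Int) (l : List (Int × Int)),
        pvExpand (p :: l) = List.replicate p.2.toNat p.1 ++ pvExpand l := fun _ _ => rfl
    rw [hexp]
    dsimp only
    have hcx : (List.count x (x :: xs) : Int).toNat = List.count x xs + 1 := by
      simp [List.count_cons_self]
    -- counts of tail keys drop the head x
    have hcongr : ∀ (s : List Int), (∀ k ∈ s, k ≠ x) →
        s.map (fun k => (k, (List.count k (x :: xs) : Int)))
          = s.map (fun k => (k, (List.count k xs : Int))) := by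
      intro s hsne
      refine List.map_congr_left ?_
      intro k hk
      have hne := hsne k hk
      simp [Ne.symm hne]
    by_cases hx : x ∈ xs
    · -- head of xs is x again
      cases xs with
      | nil => exact absurd hx (List.not_mem_nil)
      | cons y xs' =>
        have hyx : y = x := by
          rcases List.mem_cons.mp hx with h' | h'
          · exact h'.symm
          · exact le_antisymm ((List.pairwise_cons.mp htail).1 x h') (hx_le y (by simp))
        subst hyx
        have hset : PySem.Set.discard (PySem.Set.ofList (y :: xs')) y
            = PySem.Set.discard (PySem.Set.ofList xs') y := by
          rw [PySem.Set.ofList_cons, pvDiscard_cons_self, pvDiscard_idem]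
        rw [hset]
        have hne : ∀ k ∈ PySem.Set.discard (PySem.Set.ofList xs') y, k ≠ y := by
          intro k hk
          exact ((PySem.Set.mem_discard _ _ _).mp hk).2
        rw [hcongr _ hne]
        have ihe := ih htail
        rw [PySem.Set.ofList_cons, List.map_cons, hexp] at ihe
        dsimp only at ihe
        -- ihe : replicate (count y (y::xs')) y ++ expand (tail map with counts xs') = y :: xs'
        rw [hcx]
        have : List.replicate (List.count y (y :: xs') + 1) y
            = y :: List.replicate (List.count y (y :: xs')) y := rfl
        rw [this]
        have hcy : (List.count y (y :: xs') : Int).toNat = List.count y (y :: xs') := by simp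
        rw [hcy] at ihe
        rw [List.cons_append, ihe]
    · -- x is fresh
      rw [pvDiscard_not_mem xs x hx]
      have hne : ∀ k ∈ PySem.Set.ofList xs, k ≠ x := by
        intro k hk he
        exact hx (he ▸ (PySem.Set.mem_ofList _ _).mp hk)
      rw [hcongr _ hne]
      rw [hcx, List.count_eq_zero.mpr hx]
      rw [ih htail]
      rfl

lemma pvLe_getLast (hs : List Int) (h : hs.Pairwise (· ≤ ·)) (hne : hs ≠ [])
    (k : Int) (hk : k ∈ hs) : k ≤ hs.getLast hne := by
  obtain ⟨i, hi, hik⟩ := List.mem_iff_getElem.mp hk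
  rw [List.getLast_eq_getElem]
  subst hik
  rcases Nat.lt_or_ge i (hs.length - 1) with h' | h'
  · exact List.pairwise_iff_getElem.mp h i (hs.length - 1) hi (by omega) h'
  · have : i = hs.length - 1 := by omega
    subst this
    exact le_refl _

lemma pvSorted_filter (allT : List (Int × Int × Int)) (p : Int × Int × Int → Bool)
    (hnd : allT.Nodup) :
    PySem.List.sorted (allT.filter p) pvKey3 true
      = (PySem.List.sorted allT pvKey3 true).filter p := by
  apply PySem.List.sorted_rev_eq_of_perm_of_pairwise_gt
  · exact (PySem.List.sorted_perm allT pvKey3 true).filter p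
  · have hle := PySem.List.sorted_pairwise_rev allT pvKey3
    have hnd' : (PySem.List.sorted allT pvKey3 true).Nodup :=
      ((PySem.List.sorted_perm allT pvKey3 true).nodup_iff).mpr hnd
    have hlt : (PySem.List.sorted allT pvKey3 true).Pairwise
        (fun a b => pvKey3 b < pvKey3 a) :=
      (hle.and hnd').imp (fun h => lt_of_le_of_ne h.1 (fun hk => h.2 (pvKey3_inj hk).symm))
    exact hlt.sublist List.filter_sublist


theorem pv_main (healths : List Int) (items : List (List Int))
    (hpre : Pre_solution healths items) :
    solution healths items = solution_alt healths items := by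
  obtain ⟨hne, -⟩ := hpre
  unfold solution solution_alt
  dsimp only
  set hs := PySem.List.sorted healths (fun x => x) false with hhs
  have hsp : hs.Pairwise (· ≤ ·) := by
    simpa using PySem.List.sorted_pairwise healths (fun x => x)
  have hsne : hs ≠ [] := by
    intro h0
    have hperm := PySem.List.sorted_perm healths (fun x => x) false
    rw [← hhs, h0] at hperm
    exact hne hperm.symm.eq_nil
  set mx := PySem.List.pyGetD hs (-1) 0 with hmxdef
  have hmx : mx = hs.getLast hsne := PySem.List.pyGetD_neg_one hs 0 hsne
  set es0 := (PySem.Set.ofList hs).map (fun k => (k, (List.count k hs : Int))) with hes0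
  have hcnt : PySem.Dict.counter hs = PySem.Dict.mk es0 := by
    apply PySem.Dict.ext
    rw [PySem.Dict.items_counter]
  have hstrict := pvDedup_strict hs hsp
  have hp0 : es0.Pairwise (fun p q => p.1 < q.1) :=
    List.pairwise_map.mpr (hstrict.imp (fun h => h))
  have hpos0 : ∀ p ∈ es0, 0 < p.2 := by
    intro p hp
    obtain ⟨k, hk, rfl⟩ := List.mem_map.mp hp
    have : k ∈ hs := (PySem.Set.mem_ofList _ _).mp hk
    simpa using List.count_pos_iff.mpr this
  have hbd0 : ∀ p ∈ es0, p.1 ≤ mx := by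
    intro p hp
    obtain ⟨k, hk, rfl⟩ := List.mem_map.mp hp
    have : k ∈ hs := (PySem.Set.mem_ofList _ _).mp hk
    rw [hmx]
    exact pvLe_getLast hs hsp hsne k this
  have hexp0 : pvExpand es0 = hs := pvExpand_counter hs hsp
  set allT := (PySem.List.enumerate items 0).map pvMk3 with hallT
  have hfm : ((PySem.List.enumerate items 0).filter
        (fun p => decide (PySem.List.pyGetD p.2 1 0 < mx))).map pvMk3
      = allT.filter (fun t => decide (t.2.1 < mx)) := by
    rw [hallT, List.filter_map]
    rfl
  have hnd : allT.Nodup := by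
    have henum : (PySem.List.enumerate items 0).Pairwise (fun p q => p.1 < q.1) :=
      PySem.List.pairwise_lt_enumerate items 0
    have h3 : allT.Pairwise (fun a b => a.2.2 < b.2.2) :=
      List.pairwise_map.mpr (henum.imp (fun h => by simpa [pvMk3] using h))
    exact h3.imp (fun h => fun he => absurd (he ▸ h) (lt_irrefl _))
  have hsf := pvSorted_filter allT (fun t => decide (t.2.1 < mx)) hnd
  rw [hfm, hsf, hcnt, ← hexp0]
  rw [pvLoop_sim mx (PySem.List.sorted allT pvKey3 true) es0 [] hp0 hpos0 hbd0]

-- ===== VERDICT (by name: the statement is the Claim_ definition above) =====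
theorem solution_spec : Claim_equal_solution := by
  intro healths items _ hpre
  unfold Spec_solution
  exact pv_main healths items hpre
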